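-- pv_equiv track=rewrite | github.com/yuget0526/shakei | backend/app/pdf_extractor.py | _merge_multipage_files
-- ===== SOURCE A (Python) =====
-- from typing import Dict, List, Tuple
--
-- def _merge_multipage_files(page_data: List[Tuple[str, int, int, str]]) -> Dict[str, str]:
--     """
--     Merge pages that belong to the same file.
--     page_data: List of (filename, current_page, total_pages, cleaned_text)
--     Returns: Dict of filename -> merged code
--     """
--     # Group pages by filename
--     file_pages: Dict[str, List[Tuple[int, str]]] = {}
--
--     for filename, current_page, total_pages, text in page_data:
--         if filename not in file_pages:
--             file_pages[filename] = []
--         file_pages[filename].append((current_page, text))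
--
--     # Merge pages for each file
--     merged: Dict[str, str] = {}
--     for filename, pages in file_pages.items():
--         # Sort by page number
--         pages.sort(key=lambda x: x[0])
--         # Merge all page texts
--         merged_text = "\n".join(text for _, text in pages)
--         merged[filename] = merged_text
--
--     return merged
-- ===== SOURCE B (Python) =====
-- from typing import Dict, List, Tuple
--
-- def _merge_multipage_files(page_data: List[Tuple[str, int, int, str]]) -> Dict[str, str]:
--     """Per distinct filename (first-appearance order), filter its rows,
--     stable-sort them by page number and join the texts."""
--     filenames = list(dict.fromkeys(fn for fn, _, _, _ in page_data))
--     return {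
--         fn: "\n".join(
--             row[3]
--             for row in sorted(
--                 (row for row in page_data if row[0] == fn),
--                 key=lambda r: r[1],
--             )
--         )
--         for fn in filenames
--     }
-- ===== Notes on version B (the rewrite author's own statement) =====
-- stated objective: alternative
-- what changed: Replaced A's two dict-building passes (group rows into a dict of page buckets, then sort each bucket and join) by a direct comprehension: dedup the filenames once, then for each filename filter its rows from the input, stable-sort by page and join the texts - no intermediate bucket dict is built.
import Mathlib
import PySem

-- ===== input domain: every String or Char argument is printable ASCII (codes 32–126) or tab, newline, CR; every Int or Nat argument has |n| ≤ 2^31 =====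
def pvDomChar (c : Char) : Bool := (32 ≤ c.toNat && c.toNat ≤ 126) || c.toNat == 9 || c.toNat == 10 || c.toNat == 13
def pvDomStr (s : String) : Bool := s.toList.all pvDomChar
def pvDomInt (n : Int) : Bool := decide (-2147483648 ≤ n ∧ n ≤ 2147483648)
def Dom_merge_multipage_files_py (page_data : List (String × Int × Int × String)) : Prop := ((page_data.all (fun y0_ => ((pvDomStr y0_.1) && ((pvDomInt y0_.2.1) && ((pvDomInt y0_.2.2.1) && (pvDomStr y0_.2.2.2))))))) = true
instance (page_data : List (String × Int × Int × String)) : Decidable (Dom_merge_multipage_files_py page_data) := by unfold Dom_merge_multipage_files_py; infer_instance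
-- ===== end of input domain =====

-- B merges the pages by filtering the rows of each distinct filename directly instead of
-- building a dict of page buckets first (objective: alternative decomposition, not faster).

-- ===== PORT A =====
def merge_multipage_files_py (page_data : List (String × Int × Int × String)) : List (String × String) :=
  -- file_pages: group pages by filename (if absent, start with []; then append (page, text))
  let file_pages : PySem.Dict String (List (Int × String)) :=
    page_data.foldl (fun d r =>
      let d1 := if d.contains r.1 then d else d.insert r.1 ([] : List (Int × String))
      d1.modify r.1 [] (fun ps => ps ++ [(r.2.1, r.2.2.2)])) PySem.Dict.empty
  -- merged: for each filename, sort its pages by page number and join the texts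
  let merged : PySem.Dict String String :=
    file_pages.items.foldl (fun m p =>
      m.insert p.1 (PySem.Str.join "\n" ((PySem.List.sorted p.2 (fun x => x.1) false).map (fun x => x.2)))) PySem.Dict.empty
  merged.items

-- ===== PORT B =====
def merge_multipage_files_py_alt (page_data : List (String × Int × Int × String)) : List (String × String) :=
  (PySem.List.dedup (page_data.map (fun r => r.1))).map (fun fn =>
    (fn, PySem.Str.join "\n"
      ((PySem.List.sorted (page_data.filter (fun r => r.1 == fn)) (fun r => r.2.1) false).map
        (fun r => r.2.2.2))))

-- ===== PRECONDITION & SPEC =====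
def Spec_merge_multipage_files_py (page_data : List (String × Int × Int × String)) (out : List (String × String)) : Prop := out = merge_multipage_files_py_alt page_data
instance (page_data : List (String × Int × Int × String)) (out : List (String × String)) : Decidable (Spec_merge_multipage_files_py page_data out) := by unfold Spec_merge_multipage_files_py; infer_instance

-- ===== CLAIM (what is proved, stated in full; the proofs are below) =====
def Claim_equal_merge_multipage_files_py : Prop := ∀ (page_data : List (String × Int × Int × String)), Dom_merge_multipage_files_py page_data → Spec_merge_multipage_files_py page_data (merge_multipage_files_py page_data)

-- ===== LEMMAS AND PROOFS =====

-- inserting a mapped element into a mapped list = mapping the insertion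
theorem pv_insertBy_map {α β : Type} (g : α → β) (bf : β → β → Bool) (x : α) (l : List α) :
    PySem.List.insertBy bf (g x) (l.map g)
      = (PySem.List.insertBy (fun a b => bf (g a) (g b)) x l).map g := by
  induction l with
  | nil => simp [PySem.List.insertBy]
  | cons y t ih => simp [PySem.List.insertBy]; split_ifs <;> simp [ih]

-- stable sort of a mapped list by a key = map of the stable sort by the composed key
theorem pv_sorted_map {α β κ : Type} [LinearOrder κ] (g : α → β) (key : β → κ) (l : List α) :
    PySem.List.sorted (l.map g) key false
      = (PySem.List.sorted l (fun a => key (g a)) false).map g := by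
  rw [PySem.List.sorted_eq_foldl_insertBy, PySem.List.sorted_eq_foldl_insertBy, List.foldl_map]
  suffices h : ∀ (acc : List α),
      l.foldl (fun acc a => PySem.List.insertBy (fun a b => decide (key a < key b)) (g a) acc) (acc.map g)
        = (l.foldl (fun acc a => PySem.List.insertBy (fun a b => decide (key (g a) < key (g b))) a acc) acc).map g by
    simpa using h []
  induction l with
  | nil => intro acc; simp
  | cons y t ih => intro acc; rw [List.foldl_cons, List.foldl_cons, pv_insertBy_map g, ih]

-- the grouping loop of A: the bucket of filename c is the filtered, projected input
theorem pv_Afold_getD (l : List (String × Int × Int × String))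
    (d : PySem.Dict String (List (Int × String))) (c : String) :
    (l.foldl (fun d r =>
        (if d.contains r.1 then d else d.insert r.1 ([] : List (Int × String))).modify r.1 []
          (fun ps => ps ++ [(r.2.1, r.2.2.2)])) d).getD c []
      = d.getD c [] ++ (l.filter (fun r => r.1 == c)).map (fun r => (r.2.1, r.2.2.2)) := by
  induction l generalizing d with
  | nil => simp
  | cons r t ih =>
      simp only [List.foldl_cons, ih, List.filter_cons]
      by_cases hc : d.contains r.1
      · simp only [hc, if_true, PySem.Dict.getD_modify]
        by_cases h : c = r.1
        · simp [h]
        · simp [h, Ne.symm h]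
      · simp only [hc, if_false, Bool.false_eq_true, PySem.Dict.getD_modify, PySem.Dict.getD_insert]
        by_cases h : c = r.1
        · subst h
          have hz : d.getD r.1 [] = [] := PySem.Dict.getD_of_not_contains d [] (by simpa using hc)
          simp [hz]
        · simp [h, Ne.symm h]

-- the grouping loop of A: its keys are the filenames, first occurrences in order
theorem pv_Afold_keys (l : List (String × Int × Int × String))
    (d : PySem.Dict String (List (Int × String))) :
    (l.foldl (fun d r =>
        (if d.contains r.1 then d else d.insert r.1 ([] : List (Int × String))).modify r.1 []
          (fun ps => ps ++ [(r.2.1, r.2.2.2)])) d).keys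
      = PySem.Set.update d.keys (l.map (fun r => r.1)) := by
  induction l generalizing d with
  | nil => simp
  | cons r t ih =>
      simp only [List.foldl_cons, ih, List.map_cons, PySem.Set.update, List.foldl_cons]
      congr 1
      by_cases hc : d.contains r.1
      · have hmem : r.1 ∈ d.keys := (PySem.Dict.contains_iff_mem_keys d r.1).mp hc
        rw [if_pos hc, PySem.Dict.keys_modify, PySem.Dict.keys_insert_of_contains _ _ hc]
        simp [PySem.Set.add, hmem]
      · have hmem : r.1 ∉ d.keys := fun h => by
          simp [(PySem.Dict.contains_iff_mem_keys d r.1).mpr h] at hc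
        rw [if_neg (by simp [hc]), PySem.Dict.keys_modify,
          PySem.Dict.keys_insert_of_contains _ _ (PySem.Dict.contains_insert_self d r.1 _),
          PySem.Dict.keys_insert_of_not_contains d _ (by simpa using hc)]
        simp [PySem.Set.add, hmem]

-- ===== VERDICT (by name: the statement is the Claim_ definition above) =====
theorem merge_multipage_files_py_spec : Claim_equal_merge_multipage_files_py := by
  intro page_data _
  show merge_multipage_files_py page_data = merge_multipage_files_py_alt page_data
  unfold merge_multipage_files_py merge_multipage_files_py_alt
  simp only []
  set fp : PySem.Dict String (List (Int × String)) :=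
    page_data.foldl (fun d r =>
      (if d.contains r.1 then d else d.insert r.1 ([] : List (Int × String))).modify r.1 []
        (fun ps => ps ++ [(r.2.1, r.2.2.2)])) PySem.Dict.empty with hfp
  have hkeys : fp.keys = PySem.Set.ofList (page_data.map (fun r => r.1)) := by
    rw [hfp, pv_Afold_keys]
    simp [PySem.Set.update_nil_left]
  have hnd : fp.keys.Nodup := hkeys ▸ PySem.Set.nodup_ofList _
  have hmapkeys : fp.items.map (fun p => p.1) = fp.keys := rfl
  rw [PySem.Dict.items_foldl_insert_fresh fp.items (fun p => p.1)
      (fun p => PySem.Str.join "\n" ((PySem.List.sorted p.2 (fun x => x.1) false).map (fun x => x.2)))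
      PySem.Dict.empty (by intro a _; simp) (by rw [hmapkeys]; exact hnd)]
  rw [PySem.Dict.items_eq_map_keys fp hnd [], List.map_map, hkeys, PySem.List.dedup_eq_ofList]
  simp only [PySem.Dict.empty, List.nil_append]
  refine List.map_congr_left ?_
  intro fn _
  have hb : fp.getD fn [] = (page_data.filter (fun r => r.1 == fn)).map (fun r => (r.2.1, r.2.2.2)) := by
    rw [hfp, pv_Afold_getD]; simp
  simp only [Function.comp_apply]
  rw [hb, pv_sorted_map (fun r => ((r.2.1, r.2.2.2) : Int × String)) (fun x => x.1) (List.filter (fun r => r.1 == fn) page_data), List.map_map]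
  rfl
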